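-- pv_equiv track=rewrite | github.com/Thernn88/SAPPHYRE | mafft_new.py | deinterleave
-- ===== SOURCE A (Python) =====
-- def deinterleave(fasta_lines: list) -> str:
--     result = []
--     this_out = list()
--     for line in fasta_lines:
--         if line != '':
--             if line[0] == '>':
--                 if this_out:
--                     result.append(''.join(this_out))
--                 result.append(line)
--                 this_out = list()
--             else:
--                 this_out.append(line.strip())
--     if this_out != list():
--         result.append(''.join(this_out))
--     return result
-- ===== SOURCE B (Python) =====
-- def deinterleave(fasta_lines: list) -> str:
--     def span_seq(lines):
--         # stripped sequence lines up to (not incl.) the next header, and the rest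
--         seg = []
--         for k, l in enumerate(lines):
--             if l[0] == '>':
--                 return seg, lines[k:]
--             seg.append(l.strip())
--         return seg, []
--
--     lines = [l for l in fasta_lines if l != '']
--     out = []
--     while lines:
--         head = lines[0]
--         if head[0] == '>':
--             out.append(head)
--             lines = lines[1:]
--         else:
--             seg, lines = span_seq(lines[1:])
--             out.append(''.join([head.strip()] + seg))
--     return out
-- ===== Notes on version B (the rewrite author's own statement) =====
-- stated objective: alternative
-- what changed: Instead of A's flush-on-header accumulator with an end-of-loop flush, B first drops empty lines, then segments the remaining lines at headers: each header is emitted verbatim and each maximal run of non-header lines is joined (stripped) in one step, with no pending-accumulator state.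
import Mathlib
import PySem

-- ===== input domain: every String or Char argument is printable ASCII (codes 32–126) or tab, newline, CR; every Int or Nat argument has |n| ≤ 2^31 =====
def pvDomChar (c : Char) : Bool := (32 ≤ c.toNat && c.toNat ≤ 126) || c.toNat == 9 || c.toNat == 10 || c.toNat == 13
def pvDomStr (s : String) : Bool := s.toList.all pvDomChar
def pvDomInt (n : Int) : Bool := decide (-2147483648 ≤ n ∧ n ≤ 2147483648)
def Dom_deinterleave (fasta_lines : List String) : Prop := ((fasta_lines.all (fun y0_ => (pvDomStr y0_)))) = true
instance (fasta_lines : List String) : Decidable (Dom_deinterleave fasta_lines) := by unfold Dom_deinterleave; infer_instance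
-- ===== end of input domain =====

-- B segments the empty-line-filtered input at headers instead of A's flush-on-header accumulator; same cost (alternative decomposition).

-- ===== PORT A =====
def deinterleave (fasta_lines : List String) : List String :=
  let st := fasta_lines.foldl (fun (st : List String × List String) line =>
    if line ≠ "" then
      if PySem.Str.pyGet? line 0 == some '>' then
        ((if st.2 ≠ [] then st.1 ++ [PySem.Str.join "" st.2] else st.1) ++ [line], [])
      else (st.1, st.2 ++ [PySem.Str.strip line])
    else st) ([], [])
  if st.2 ≠ [] then st.1 ++ [PySem.Str.join "" st.2] else st.1

-- ===== PORT B =====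
-- span_seq: stripped lines up to the next header, plus the rest
def spanSeq : List String → List String × List String
  | [] => ([], [])
  | l :: ls =>
    if PySem.Str.pyGet? l 0 == some '>' then ([], l :: ls)
    else
      let (seg, rest) := spanSeq ls
      (PySem.Str.strip l :: seg, rest)

theorem spanSeq_rest_le : ∀ (xs : List String), (spanSeq xs).2.length ≤ xs.length := by
  intro xs
  induction xs with
  | nil => simp [spanSeq]
  | cons l ls ih =>
    simp only [spanSeq]
    split
    · simp
    · simpa using Nat.le_succ_of_le ih

def deinterleaveGo : List String → List String
  | [] => []
  | l :: rest =>
    if PySem.Str.pyGet? l 0 == some '>' then l :: deinterleaveGo rest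
    else
      let p := spanSeq rest
      PySem.Str.join "" (PySem.Str.strip l :: p.1) :: deinterleaveGo p.2
  termination_by xs => xs.length
  decreasing_by
  · simp
  · have := spanSeq_rest_le rest
    simp
    omega

def deinterleave_alt (fasta_lines : List String) : List String :=
  deinterleaveGo (fasta_lines.filter (fun l => l ≠ ""))

-- ===== PRECONDITION & SPEC =====
def Spec_deinterleave (fasta_lines : List String) (out : List String) : Prop := out = deinterleave_alt fasta_lines
instance (fasta_lines : List String) (out : List String) : Decidable (Spec_deinterleave fasta_lines out) := by unfold Spec_deinterleave; infer_instance

-- ===== CLAIM (what is proved, stated in full; the proofs are below) =====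
def Claim_equal_deinterleave : Prop := ∀ (fasta_lines : List String), Dom_deinterleave fasta_lines → Spec_deinterleave fasta_lines (deinterleave fasta_lines)

-- ===== LEMMAS AND PROOFS =====

-- A's loop step and final flush, named for readable goals
def stepA (st : List String × List String) (line : String) : List String × List String :=
  if line ≠ "" then
    if PySem.Str.pyGet? line 0 == some '>' then
      ((if st.2 ≠ [] then st.1 ++ [PySem.Str.join "" st.2] else st.1) ++ [line], [])
    else (st.1, st.2 ++ [PySem.Str.strip line])
  else st

def flushA (acc : List String) : List String :=
  if acc ≠ [] then [PySem.Str.join "" acc] else []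

-- A's remaining computation given pending stripped accumulator acc (skips empty lines)
def finishA (acc : List String) : List String → List String
  | [] => flushA acc
  | l :: ls =>
    if l ≠ "" then
      if PySem.Str.pyGet? l 0 == some '>' then
        flushA acc ++ l :: finishA [] ls
      else finishA (acc ++ [PySem.Str.strip l]) ls
    else finishA acc ls

theorem deinterleave_eq_fold (fasta_lines : List String) :
    deinterleave fasta_lines =
      (fasta_lines.foldl stepA ([], [])).1 ++ flushA (fasta_lines.foldl stepA ([], [])).2 := by
  unfold deinterleave
  have hstep : (fun (st : List String × List String) line =>
      if line ≠ "" then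
        if PySem.Str.pyGet? line 0 == some '>' then
          ((if st.2 ≠ [] then st.1 ++ [PySem.Str.join "" st.2] else st.1) ++ [line], [])
        else (st.1, st.2 ++ [PySem.Str.strip line])
      else st) = stepA := by
    funext st line
    simp [stepA]
  rw [hstep]
  simp only [flushA]
  split <;> simp_all

theorem foldA_eq_finishA (ls : List String) : ∀ (res acc : List String),
    (ls.foldl stepA (res, acc)).1 ++ flushA (ls.foldl stepA (res, acc)).2
      = res ++ finishA acc ls := by
  induction ls with
  | nil =>
    intro res acc
    simp [finishA]
  | cons l ls ih =>
    intro res acc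
    simp only [List.foldl_cons, finishA]
    by_cases hl : l = ""
    · have : stepA (res, acc) l = (res, acc) := by simp [stepA, hl]
      rw [this, ih]
      simp [hl]
    · by_cases hq : PySem.List.pyGet? l.toList 0 = some '>'
      · have : stepA (res, acc) l = ((res ++ flushA acc) ++ [l], []) := by
          simp [stepA, flushA, hl, hq]
          split <;> simp
        rw [this, ih]
        simp [hl, hq, flushA]
      · have : stepA (res, acc) l = (res, acc ++ [PySem.Str.strip l]) := by
          simp [stepA, hl, hq]
        rw [this, ih]
        simp [hl, hq]

-- finishA skips empties: it only depends on the filtered list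
def finishF (acc : List String) : List String → List String
  | [] => flushA acc
  | l :: ls =>
    if PySem.Str.pyGet? l 0 == some '>' then
      flushA acc ++ l :: finishF [] ls
    else finishF (acc ++ [PySem.Str.strip l]) ls

theorem finishA_eq_finishF (ls : List String) : ∀ acc,
    finishA acc ls = finishF acc (ls.filter (fun l => l ≠ "")) := by
  induction ls with
  | nil => intro acc; simp [finishA, finishF]
  | cons l ls ih =>
    intro acc
    by_cases hl : l = ""
    · simp [finishA, finishF, hl, ih]
    · by_cases hq : PySem.List.pyGet? l.toList 0 = some '>' <;>
        simp [finishA, finishF, hl, hq, ih]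

theorem finishF_eq_go (xs : List String) : ∀ acc,
    finishF acc xs =
      if acc = [] then deinterleaveGo xs
      else PySem.Str.join "" (acc ++ (spanSeq xs).1) :: deinterleaveGo (spanSeq xs).2 := by
  induction xs with
  | nil =>
    intro acc
    by_cases h : acc = [] <;> simp [finishF, flushA, spanSeq, deinterleaveGo, h]
  | cons l ls ih =>
    intro acc
    by_cases hq : PySem.List.pyGet? l.toList 0 = some '>'
    · by_cases h : acc = [] <;>
        simp [finishF, flushA, hq, spanSeq, deinterleaveGo, h, ih]
    · have key : finishF (acc ++ [PySem.Str.strip l]) ls =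
          PySem.Str.join "" (acc ++ PySem.Str.strip l :: (spanSeq ls).1) ::
            deinterleaveGo (spanSeq ls).2 := by
        rw [ih]
        simp
      by_cases h : acc = []
      · subst h
        simp only [finishF, PySem.Str.pyGet?_eq, beq_iff_eq, hq, if_false, List.nil_append,
          if_neg, not_false_eq_true]
        simp only [List.nil_append] at key
        rw [key]
        simp [deinterleaveGo, hq]
      · simp only [finishF, PySem.Str.pyGet?_eq, beq_iff_eq, hq, if_false, if_neg,
          not_false_eq_true]
        rw [key]
        simp [h, spanSeq, hq]

-- ===== VERDICT (by name: the statement is the Claim_ definition above) =====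
theorem deinterleave_spec : Claim_equal_deinterleave := by
  intro fasta_lines _
  unfold Spec_deinterleave deinterleave_alt
  rw [deinterleave_eq_fold, foldA_eq_finishA, finishA_eq_finishF, finishF_eq_go]
  simp
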